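-- pv_equiv track=rewrite | github.com/marysue/CodingChallenges | DesmosTest/app/validateClassCodes.py | foundAllLettersInCode
-- ===== SOURCE A (Python) =====
-- def foundAllLettersInCode(code, distracting_words) :
--     #returns Trueif code contains all letters of
--     #any distracting word
--
--     #for each distracting word
--     for distracting_word in distracting_words:
--         distracting_word = distracting_word.lower()
--         #look at every code character and see if it is in distracting word
--         for char in code :
--             idx = distracting_word.find(char)
--             if (idx >= 0):
--                # remove the matched char from distracting word
--                 distracting_word = distracting_word[:idx] + distracting_word[idx + 1:]
--
--             #If we've removed all of the letters of the distracting word, then code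
--             #has the distracting word letters in various order.
--             if len(distracting_word) == 0:
--                 return True
--
--     #if we made it here, all of the letters of any distracting word is not in the code
--     return False
-- ===== SOURCE B (Python) =====
-- def foundAllLettersInCode(code, distracting_words):
--     # Sort the code's characters once; a word is covered iff its sorted
--     # lower-cased letters are (greedily) a subsequence of the sorted code,
--     # i.e. its letter multiset is contained in the code's.
--     if not code:
--         # with an empty code A never reports a covered word (even an empty one)
--         return False
--     sorted_code = sorted(code)
--     for word in distracting_words:
--         rem = sorted(word.lower())
--         for c in sorted_code:
--             if rem and c == rem[0]:
--                 rem = rem[1:]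
--         if not rem:
--             return True
--     return False
-- ===== Notes on version B (the rewrite author's own statement) =====
-- stated objective: faster
-- what changed: Replaces the per-word rescan of the whole code with repeated string find/slice rebuilding (O(len(code)*len(word)) slicing per word) by sorting the code once and each lower-cased word, then deciding multiset coverage with a single linear merge walk over the two sorted sequences.
import Mathlib
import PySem

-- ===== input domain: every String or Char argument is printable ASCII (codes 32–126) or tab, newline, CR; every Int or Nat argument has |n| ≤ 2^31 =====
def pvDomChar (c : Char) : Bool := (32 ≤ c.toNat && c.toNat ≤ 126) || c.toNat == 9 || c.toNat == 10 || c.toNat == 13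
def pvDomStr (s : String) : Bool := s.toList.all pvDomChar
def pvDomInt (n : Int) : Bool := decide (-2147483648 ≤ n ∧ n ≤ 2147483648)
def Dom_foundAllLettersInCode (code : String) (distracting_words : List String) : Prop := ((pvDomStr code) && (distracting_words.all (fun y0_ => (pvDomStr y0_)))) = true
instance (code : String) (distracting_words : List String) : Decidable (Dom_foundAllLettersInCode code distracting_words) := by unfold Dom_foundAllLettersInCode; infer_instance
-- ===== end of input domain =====

-- B sorts the code once and tests each lower-cased word by a linear merge walk over the
-- two sorted char sequences instead of A's per-code-char find-and-rebuild of the word.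

-- ===== PORT A =====
-- inner 'for char in code' loop of A: state = the shrinking distracting_word;
-- returns true as soon as the word is emptied (A's early 'return True')
def pvAInner : List Char → List Char → Bool
  | [], _ => false
  | c :: rest, w =>
      let idx := PySem.Chars.find w [c]
      let w' := if 0 ≤ idx then
          PySem.Chars.slice w none (some idx) ++ PySem.Chars.slice w (some (idx + 1)) none
        else w
      if PySem.Chars.len w' = 0 then true else pvAInner rest w'

-- outer 'for distracting_word in distracting_words' loop of A
def pvAOuter (cs : List Char) : List String → Bool
  | [] => false
  | w :: rest =>
      if pvAInner cs (PySem.Chars.lower w.toList) then true else pvAOuter cs rest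

def foundAllLettersInCode (code : String) (distracting_words : List String) : Bool :=
  pvAOuter code.toList distracting_words

-- ===== PORT B =====
-- Source B inner loop: 'if rem and c == rem[0]: rem = rem[1:]'
def pvBStep (rem : List Char) (c : Char) : List Char :=
  match rem with
  | [] => rem
  | d :: ds => if c = d then ds else rem

def pvBConsume (sorted_code sw : List Char) : List Char :=
  sorted_code.foldl pvBStep sw

-- Source B outer loop with its early 'return True'
def pvBLoop (sorted_code : List Char) : List String → Bool
  | [] => false
  | w :: rest =>
      if pvBConsume sorted_code (PySem.List.sorted (PySem.Chars.lower w.toList) (fun x => x) false) = [] then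
        true
      else pvBLoop sorted_code rest

def foundAllLettersInCode_alt (code : String) (distracting_words : List String) : Bool :=
  if code.toList = [] then false
  else pvBLoop (PySem.List.sorted code.toList (fun x => x) false) distracting_words

-- ===== PRECONDITION & SPEC =====
def Spec_foundAllLettersInCode (code : String) (distracting_words : List String) (out : Bool) : Prop := out = foundAllLettersInCode_alt code distracting_words
instance (code : String) (distracting_words : List String) (out : Bool) : Decidable (Spec_foundAllLettersInCode code distracting_words out) := by unfold Spec_foundAllLettersInCode; infer_instance

-- ===== CLAIM (what is proved, stated in full; the proofs are below) =====
def Claim_equal_foundAllLettersInCode : Prop := ∀ (code : String) (distracting_words : List String), Dom_foundAllLettersInCode code distracting_words → Spec_foundAllLettersInCode code distracting_words (foundAllLettersInCode code distracting_words)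

-- ===== LEMMAS AND PROOFS =====

-- erasing the FIRST occurrence (at index i) is take i ++ drop (i+1)
theorem pv_erase_eq (c : Char) : ∀ (w : List Char) (i : Nat), w[i]? = some c →
    (∀ j, j < i → w[j]? ≠ some c) → w.erase c = w.take i ++ w.drop (i + 1) := by
  intro w
  induction w with
  | nil => intro i h _; simp at h
  | cons d t ih =>
    intro i h hmin
    cases i with
    | zero =>
      simp at h
      simp [h, List.erase_cons_head]
    | succ n =>
      have hd : d ≠ c := by
        intro hdc
        exact (hmin 0 (Nat.succ_pos n)) (by simp [hdc])
      have hbeq : (d == c) = false := by simp [hd]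
      have ht : t[n]? = some c := by simpa using h
      have htmin : ∀ j, j < n → t[j]? ≠ some c := by
        intro j hj
        have := hmin (j + 1) (by omega)
        simpa using this
      simp [hbeq, ih n ht htmin]

-- the singleton-prefix test is a head? test
theorem pv_singleton_prefix_iff (c : Char) (l : List Char) : [c] <+: l ↔ l.head? = some c := by
  cases l with
  | nil => simp
  | cons d t =>
    constructor
    · intro h; rcases h with ⟨r, hr⟩; simp at hr; simp [hr.1]
    · intro h; simp at h; exact ⟨t, by simp [h]⟩

-- A's find + two slices is List.erase of that char
theorem pvAStep_eq_erase (w : List Char) (c : Char) :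
    (if 0 ≤ PySem.Chars.find w [c] then
        PySem.Chars.slice w none (some (PySem.Chars.find w [c])) ++
          PySem.Chars.slice w (some (PySem.Chars.find w [c] + 1)) none
      else w) = w.erase c := by
  by_cases hc : c ∈ w
  · have hinf : [c] <:+: w := (List.singleton_infix_iff c w).mpr hc
    have hnn : 0 ≤ PySem.Chars.find w [c] := (PySem.Chars.find_nonneg_iff w [c]).mpr hinf
    obtain ⟨hpre, hmin⟩ := PySem.Chars.find_spec hnn
    rw [if_pos hnn, PySem.Chars.slice_eq_listSlice, PySem.Chars.slice_eq_listSlice,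
      PySem.List.slice_to w hnn, PySem.List.slice_from w (by omega)]
    have htn : (PySem.Chars.find w [c] + 1).toNat = (PySem.Chars.find w [c]).toNat + 1 := by omega
    rw [htn]
    refine (pv_erase_eq c w (PySem.Chars.find w [c]).toNat ?_ ?_).symm ▸ rfl
    · rw [← List.head?_drop]
      exact (pv_singleton_prefix_iff c _).mp hpre
    · intro j hj hjc
      exact hmin j hj ((pv_singleton_prefix_iff c _).mpr (by rw [List.head?_drop]; exact hjc))
  · have hne : PySem.Chars.find w [c] = -1 := by
      rw [PySem.Chars.find_eq_neg_one_iff]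
      intro hinf
      exact hc ((List.singleton_infix_iff c w).mp hinf)
    rw [hne, if_neg (by omega), List.erase_of_not_mem hc]

theorem pv_foldl_erase_nil (cs : List Char) : List.foldl List.erase ([] : List Char) cs = [] := by
  induction cs with
  | nil => rfl
  | cons c rest ih => simpa using ih

-- A's inner loop: true iff the code is non-empty and erasing each code char empties the word
theorem pvAInner_iff : ∀ (cs w : List Char),
    pvAInner cs w = true ↔ (cs ≠ [] ∧ List.foldl List.erase w cs = []) := by
  intro cs
  induction cs with
  | nil => intro w; simp [pvAInner]
  | cons c rest ih =>
    intro w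
    show (let idx := PySem.Chars.find w [c]
          let w' := if 0 ≤ idx then
              PySem.Chars.slice w none (some idx) ++ PySem.Chars.slice w (some (idx + 1)) none
            else w
          if PySem.Chars.len w' = 0 then true else pvAInner rest w') = true ↔ _
    simp only [pvAStep_eq_erase w c]
    have hlen : (PySem.Chars.len (w.erase c) = 0) ↔ w.erase c = [] := by
      rw [PySem.Chars.len_eq]
      exact_mod_cast List.length_eq_zero_iff
    by_cases h : w.erase c = []
    · simp [h, pv_foldl_erase_nil]
    · rw [if_neg (fun hz => h (hlen.mp hz))]
      cases rest with
      | nil => simp [pvAInner, h]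
      | cons c2 r2 => simp [ih]

-- diff = [] is exactly multiset containment (subperm)
theorem pv_diff_nil_iff (w cs : List Char) : w.diff cs = [] ↔ List.Subperm w cs := by
  constructor
  · intro h
    rw [List.subperm_ext_iff]
    intro x _
    have hcd := List.count_diff x w cs
    rw [h] at hcd
    simp at hcd
    omega
  · intro h
    have hc : ∀ x : Char, List.count x (w.diff cs) = 0 := by
      intro x
      have hcd := List.count_diff x w cs
      by_cases hx : x ∈ w
      · have := List.subperm_ext_iff.mp h x hx
        omega
      · have : List.count x w = 0 := List.count_eq_zero.mpr hx
        omega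
    cases hd : w.diff cs with
    | nil => rfl
    | cons a t =>
      have := hc a
      rw [hd] at this
      simp at this

-- on sorted lists subperm coincides with sublist
theorem pv_subperm_iff_sorted_sublist (lw cs : List Char) :
    List.Subperm lw cs ↔
      List.Sublist (PySem.List.sorted lw (fun x => x) false) (PySem.List.sorted cs (fun x => x) false) := by
  have pw := PySem.List.sorted_perm lw (fun x => x) false
  have pc := PySem.List.sorted_perm cs (fun x => x) false
  constructor
  · intro h
    refine List.sublist_of_subperm_of_pairwise (r := fun a b : Char => a ≤ b) ?_ ?_ ?_
    · exact (pc.subperm_left).mpr ((pw.subperm_right).mpr h)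
    · simpa using PySem.List.sorted_pairwise lw (fun x => x)
    · simpa using PySem.List.sorted_pairwise cs (fun x => x)
  · intro h
    have := h.subperm
    exact (pw.subperm_right).mp ((pc.subperm_left).mp this)

theorem pv_consume_nil (sc : List Char) : pvBConsume sc [] = [] := by
  induction sc with
  | nil => rfl
  | cons c rest ih => simpa [pvBConsume, pvBStep] using ih

-- B's greedy merge walk consumes the whole word iff it is a subsequence of the sorted code
theorem pv_consume_eq_nil_iff : ∀ (sc sw : List Char),
    pvBConsume sc sw = [] ↔ List.Sublist sw sc := by
  intro sc
  induction sc with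
  | nil =>
    intro sw
    simp [pvBConsume, List.sublist_nil]
  | cons c cs ih =>
    intro sw
    cases sw with
    | nil => simp [pv_consume_nil, List.nil_sublist]
    | cons d ds =>
      show pvBConsume cs (pvBStep (d :: ds) c) = [] ↔ _
      by_cases hcd : c = d
      · subst hcd
        rw [show pvBStep (c :: ds) c = ds from by simp [pvBStep]]
        rw [ih ds, List.cons_sublist_cons]
      · rw [show pvBStep (d :: ds) c = d :: ds from by simp [pvBStep, hcd]]
        rw [ih (d :: ds), List.sublist_cons_iff]
        constructor
        · exact Or.inl
        · rintro (h | ⟨r, hr, _⟩)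
          · exact h
          · injection hr with h1 _
            exact absurd h1.symm hcd

-- per word, for non-empty code: A's inner loop agrees with B's test
theorem pv_word_iff (cs lw : List Char) (hcs : cs ≠ []) :
    (pvAInner cs lw = true) ↔
      pvBConsume (PySem.List.sorted cs (fun x => x) false) (PySem.List.sorted lw (fun x => x) false) = [] := by
  rw [pvAInner_iff, pv_consume_eq_nil_iff, ← pv_subperm_iff_sorted_sublist,
    ← pv_diff_nil_iff, List.diff_eq_foldl]
  simp [hcs]

theorem pv_outer_eq (cs : List Char) (hcs : cs ≠ []) : ∀ ws : List String,
    pvAOuter cs ws = pvBLoop (PySem.List.sorted cs (fun x => x) false) ws := by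
  intro ws
  induction ws with
  | nil => rfl
  | cons w rest ih =>
    show (if pvAInner cs (PySem.Chars.lower w.toList) then true else pvAOuter cs rest) = _
    by_cases h : pvAInner cs (PySem.Chars.lower w.toList) = true
    · have hb := (pv_word_iff cs (PySem.Chars.lower w.toList) hcs).mp h
      simp [pvBLoop, h, hb]
    · have hb : ¬ pvBConsume (PySem.List.sorted cs (fun x => x) false)
          (PySem.List.sorted (PySem.Chars.lower w.toList) (fun x => x) false) = [] :=
        fun hx => h ((pv_word_iff cs (PySem.Chars.lower w.toList) hcs).mpr hx)
      simp [pvBLoop, h, hb, ih]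

theorem pvAOuter_nil_code : ∀ ws : List String, pvAOuter [] ws = false := by
  intro ws
  induction ws with
  | nil => rfl
  | cons w rest ih => simpa [pvAOuter, pvAInner] using ih

-- ===== VERDICT (by name: the statement is the Claim_ definition above) =====
theorem foundAllLettersInCode_spec : Claim_equal_foundAllLettersInCode := by
  unfold Claim_equal_foundAllLettersInCode
  intro code ws _
  unfold Spec_foundAllLettersInCode foundAllLettersInCode foundAllLettersInCode_alt
  by_cases h : code.toList = []
  · rw [if_pos h, h, pvAOuter_nil_code]
  · rw [if_neg h, pv_outer_eq code.toList h]
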